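-- pv_equiv track=rewrite | github.com/log2timeline/l2tdevtools | l2tdevtools/dependency_writers/gift_ppa.py | _FormatDPKGDebugDependencies
-- ===== SOURCE A (Python) =====
-- def _FormatDPKGDebugDependencies(debug_dependencies):
--   """Formats DPKG debug dependencies for the template.
--
--   Args:
--     debug_dependencies (list[str]): DPKG package names of debug dependencies.
--
--   Returns:
--     str: formatted DPKG debug dependencies.
--   """
--   formatted_debug_dependencies = []
--   if debug_dependencies:
--     for index, dependency in enumerate(sorted(debug_dependencies)):
--       if index == 0:
--         line = 'DEBUG_DEPENDENCIES="{0:s}'.format(dependency)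
--       else:
--         line = '                    {0:s}'.format(dependency)
--
--       if index + 1 == len(debug_dependencies):
--         line = '{0:s}";'.format(line)
--
--       formatted_debug_dependencies.append(line)
--
--   return '\n'.join(formatted_debug_dependencies)
-- ===== SOURCE B (Python) =====
-- def _FormatDPKGDebugDependencies(debug_dependencies):
--   """Formats DPKG debug dependencies for the template."""
--   if not debug_dependencies:
--     return ''
--   separator = '\n' + ' ' * 20
--   return ('DEBUG_DEPENDENCIES="'
--           + separator.join(sorted(debug_dependencies))
--           + '";')
-- ===== Notes on version B (the rewrite author's own statement) =====
-- stated objective: simpler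
-- what changed: Replaces the enumerate loop with its index==0 and index+1==len branches by a single str.join of the sorted names with a fused separator ('\n' plus 20 spaces), wrapping prefix and '";' suffix outside any loop; the one C-level join avoids per-line str.format and list appends.
import Mathlib
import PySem

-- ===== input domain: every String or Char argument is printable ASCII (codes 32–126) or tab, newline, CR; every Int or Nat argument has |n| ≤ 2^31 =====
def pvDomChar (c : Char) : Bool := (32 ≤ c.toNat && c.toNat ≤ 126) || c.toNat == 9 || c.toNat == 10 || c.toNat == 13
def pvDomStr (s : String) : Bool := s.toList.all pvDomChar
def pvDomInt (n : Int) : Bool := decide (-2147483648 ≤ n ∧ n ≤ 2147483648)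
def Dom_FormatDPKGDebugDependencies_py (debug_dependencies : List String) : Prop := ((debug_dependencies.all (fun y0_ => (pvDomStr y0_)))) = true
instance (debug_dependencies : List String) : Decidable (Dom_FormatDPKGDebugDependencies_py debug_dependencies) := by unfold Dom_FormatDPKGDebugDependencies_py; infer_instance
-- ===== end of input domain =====

-- B replaces A's enumerate loop and its first/last-index branches by one join of the
-- sorted names with a fused separator (newline + 20 spaces), wrapped by prefix/suffix (simpler).


-- ===== PORT A =====
-- Literal transliteration: build the list of lines with enumerate over the sorted
-- dependencies, branching on index == 0 and index + 1 == len, then '\n'.join it.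
def FormatDPKGDebugDependencies_py (debug_dependencies : List String) : String :=
  let formatted_debug_dependencies : List String :=
    if debug_dependencies.isEmpty then []
    else
      (PySem.List.enumerate (PySem.List.sorted debug_dependencies (fun x => x) false)).foldl
        (fun acc p =>
          let line : String :=
            if p.1 = 0 then "DEBUG_DEPENDENCIES=\"" ++ p.2
            else "                    " ++ p.2
          let line : String :=
            if p.1 + 1 = (debug_dependencies.length : Int) then line ++ "\";" else line
          acc ++ [line]) []
  PySem.Str.join "\n" formatted_debug_dependencies

-- ===== PORT B =====
-- Literal transliteration of Source B: guard the empty list, then join the sorted names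
-- with separator '\n' + 20 spaces and wrap with prefix and suffix.
def FormatDPKGDebugDependencies_py_alt (debug_dependencies : List String) : String :=
  if debug_dependencies.isEmpty then ""
  else
    "DEBUG_DEPENDENCIES=\"" ++
      PySem.Str.join "\n                    " (PySem.List.sorted debug_dependencies (fun x => x) false) ++
      "\";"

-- ===== PRECONDITION & SPEC =====
def Spec_FormatDPKGDebugDependencies_py (debug_dependencies : List String) (out : String) : Prop := out = FormatDPKGDebugDependencies_py_alt debug_dependencies
instance (debug_dependencies : List String) (out : String) : Decidable (Spec_FormatDPKGDebugDependencies_py debug_dependencies out) := by unfold Spec_FormatDPKGDebugDependencies_py; infer_instance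

-- ===== CLAIM (what is proved, stated in full; the proofs are below) =====
def Claim_equal_FormatDPKGDebugDependencies_py : Prop := ∀ (debug_dependencies : List String), Dom_FormatDPKGDebugDependencies_py debug_dependencies → Spec_FormatDPKGDebugDependencies_py debug_dependencies (FormatDPKGDebugDependencies_py debug_dependencies)

-- ===== LEMMAS AND PROOFS =====

-- The foldl that appends one line per element is the map of the line function.
theorem pvFoldlAppendMap {α β : Type} (f : α → β) :
    ∀ (l : List α) (acc : List β),
      l.foldl (fun a x => a ++ [f x]) acc = acc ++ l.map f := by
  intro l
  induction l with
  | nil => intro acc; simp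
  | cons x t ih => intro acc; simp [List.foldl, ih]

theorem joinChars_cons_ne (sep : List Char) (a : List Char) (l : List (List Char)) (h : l ≠ []) :
    PySem.Chars.join sep (a :: l) = a ++ sep ++ PySem.Chars.join sep l := by
  cases l with
  | nil => exact absurd rfl h
  | cons b r => exact PySem.Chars.join_cons_cons sep a b r

theorem pvTailJoin (n : Int) :
    ∀ (t : List String) (s : Int), t ≠ [] → 1 ≤ s → s + (t.length : Int) = n →
      (PySem.Str.join "\n" ((PySem.List.enumerate t s).map (fun p =>
        let line : String :=
          if p.1 = 0 then "DEBUG_DEPENDENCIES=\"" ++ p.2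
          else "                    " ++ p.2
        if p.1 + 1 = n then line ++ "\";" else line))).toList =
      ("                    " ++ PySem.Str.join "\n                    " t ++ "\";").toList := by
  intro t
  induction t with
  | nil => intro s h; exact absurd rfl h
  | cons d rest ih =>
    intro s _ hs hn
    have hs0 : ¬ s = 0 := by omega
    cases rest with
    | nil =>
      have hlast : s + 1 = n := by simpa using hn
      simp [PySem.List.enumerate_cons, PySem.List.enumerate_nil, hs0, hlast,
        PySem.Str.toList_join, PySem.Chars.join_singleton]
    | cons e rest' =>
      have hnot : ¬ s + 1 = n := by
        simp only [List.length_cons] at hn; push_cast at hn; omega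
      have ih' := ih (s + 1) (by simp) (by omega)
        (by simp only [List.length_cons] at hn ⊢; push_cast at hn ⊢; omega)
      rw [PySem.List.enumerate_cons, List.map_cons, PySem.Str.toList_join, List.map_cons,
        joinChars_cons_ne _ _ _ (by simp [PySem.List.enumerate_cons])]
      rw [PySem.Str.toList_join] at ih'
      rw [ih']
      simp [hs0, hnot, joinChars_cons_ne, List.append_assoc]

theorem pvMainJoin (ys : List String) (hne : ys ≠ []) :
    PySem.Str.join "\n" ((PySem.List.enumerate ys 0).map (fun p =>
        let line : String :=
          if p.1 = 0 then "DEBUG_DEPENDENCIES=\"" ++ p.2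
          else "                    " ++ p.2
        if p.1 + 1 = (ys.length : Int) then line ++ "\";" else line)) =
      "DEBUG_DEPENDENCIES=\"" ++ PySem.Str.join "\n                    " ys ++ "\";" := by
  apply String.toList_inj.mp
  cases ys with
  | nil => exact absurd rfl hne
  | cons y t =>
    cases t with
    | nil =>
      simp [PySem.List.enumerate_cons, PySem.List.enumerate_nil,
        PySem.Str.toList_join, PySem.Chars.join_singleton]
    | cons z t' =>
      have hnot : ¬ (0 : Int) + 1 = ((y :: z :: t').length : Int) := by simp; omega
      have htail := pvTailJoin ((y :: z :: t').length : Int) (z :: t') 1 (by simp)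
        (by omega) (by simp; omega)
      rw [PySem.List.enumerate_cons, List.map_cons, PySem.Str.toList_join, List.map_cons,
        joinChars_cons_ne _ _ _ (by simp [PySem.List.enumerate_cons])]
      rw [PySem.Str.toList_join] at htail
      simp only [show (0:Int)+1 = 1 from rfl]
      rw [htail]
      simp [joinChars_cons_ne, List.append_assoc, show ¬((t'.length:Int)+1 = 0) from by omega]

-- ===== VERDICT (by name: the statement is the Claim_ definition above) =====
theorem FormatDPKGDebugDependencies_py_spec : Claim_equal_FormatDPKGDebugDependencies_py := by
  intro xs _
  unfold Spec_FormatDPKGDebugDependencies_py FormatDPKGDebugDependencies_py FormatDPKGDebugDependencies_py_alt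
  by_cases h : xs.isEmpty
  · simp [h, PySem.Str.join, PySem.Chars.join_nil]
  · have hne : xs ≠ [] := by simpa [List.isEmpty_iff] using h
    have hsne : PySem.List.sorted xs (fun x => x) false ≠ [] := by
      simpa [PySem.List.sorted_eq_nil_iff] using hne
    have hlen : ((PySem.List.sorted xs (fun x => x) false).length : Int) = (xs.length : Int) := by
      simp [PySem.List.length_sorted]
    simp only [h, pvFoldlAppendMap, List.nil_append]
    rw [← hlen]
    exact pvMainJoin _ hsne
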